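-- pv_equiv track=rewrite | github.com/jakebbass/spark-template | fantasy-assistant/backend/app/core/schedule_pockets.py | _find_consecutive_pockets
-- ===== SOURCE A (Python) =====
-- from typing import Dict, Any, List
--
-- def _find_consecutive_pockets(startable_weeks: List[int]) -> List[List[int]]:
--     """Find consecutive stretches of startable weeks."""
--     if not startable_weeks:
--         return []
--
--     pockets = []
--     current_pocket = [startable_weeks[0]]
--
--     for i in range(1, len(startable_weeks)):
--         if startable_weeks[i] == startable_weeks[i-1] + 1:
--             current_pocket.append(startable_weeks[i])
--         else:
--             if len(current_pocket) >= 2:  # Only consider pockets of 2+ weeks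
--                 pockets.append(current_pocket)
--             current_pocket = [startable_weeks[i]]
--
--     # Don't forget the last pocket
--     if len(current_pocket) >= 2:
--         pockets.append(current_pocket)
--
--     return pockets
-- ===== SOURCE B (Python) =====
-- from itertools import groupby
--
-- def _find_consecutive_pockets(startable_weeks):
--     """Find consecutive stretches of startable weeks (groupby on week - index)."""
--     runs = [[w for _, w in grp]
--             for _, grp in groupby(enumerate(startable_weeks), key=lambda t: t[1] - t[0])]
--     return [run for run in runs if len(run) >= 2]
-- ===== Notes on version B (the rewrite author's own statement) =====
-- stated objective: idiomatic
-- what changed: Replaces the explicit previous-element comparison with a running accumulator by an itertools.groupby pass keyed on week - index (consecutive weeks share the key), followed by a length>=2 comprehension filter.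
import Mathlib
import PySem

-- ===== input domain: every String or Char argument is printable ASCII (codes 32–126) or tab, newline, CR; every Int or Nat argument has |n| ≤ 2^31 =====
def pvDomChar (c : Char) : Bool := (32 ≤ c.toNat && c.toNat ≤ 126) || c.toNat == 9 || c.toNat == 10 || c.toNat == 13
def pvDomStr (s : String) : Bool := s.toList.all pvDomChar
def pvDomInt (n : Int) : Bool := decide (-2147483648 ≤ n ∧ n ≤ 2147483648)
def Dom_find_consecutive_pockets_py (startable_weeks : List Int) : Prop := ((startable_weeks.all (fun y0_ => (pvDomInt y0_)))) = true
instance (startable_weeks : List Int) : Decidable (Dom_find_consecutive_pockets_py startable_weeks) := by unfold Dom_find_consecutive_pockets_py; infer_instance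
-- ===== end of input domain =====

-- B replaces A's previous-element comparison with a running accumulator by a
-- groupby pass keyed on (week - index) plus a length>=2 filter (idiomatic; same cost).

-- ===== PORT A =====
-- A's loop over range(1, len) carried as structural recursion over the tail,
-- with prev = startable_weeks[i-1]; state (pockets, current_pocket) as in A.
def pvGoA : List Int → List (List Int) → List Int → Int → List (List Int)
  | [], pockets, current, _ =>
      if current.length ≥ 2 then pockets ++ [current] else pockets
  | w :: rest, pockets, current, prev =>
      if w = prev + 1 then pvGoA rest pockets (current ++ [w]) w
      else pvGoA rest (if current.length ≥ 2 then pockets ++ [current] else pockets) [w] w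

def find_consecutive_pockets_py (startable_weeks : List Int) : List (List Int) :=
  match startable_weeks with
  | [] => []
  | w :: rest => pvGoA rest [] [w] w

-- ===== PORT B =====
-- groupby(enumerate(ws), key = week - index): each group is consumed greedily.
def pvTakeRun (k : Int) : List (Int × Int) → List Int × List (Int × Int)
  | [] => ([], [])
  | (i, w) :: rest =>
      if w - i = k then
        let p := pvTakeRun k rest
        (w :: p.1, p.2)
      else ([], (i, w) :: rest)

theorem pvTakeRun_len (k : Int) (ps : List (Int × Int)) :
    (pvTakeRun k ps).2.length ≤ ps.length := by
  induction ps with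
  | nil => simp [pvTakeRun]
  | cons p rest ih =>
    obtain ⟨i, w⟩ := p
    simp only [pvTakeRun]
    split
    · exact Nat.le_succ_of_le ih
    · simp

def pvGroups : List (Int × Int) → List (List Int)
  | [] => []
  | (i, w) :: rest =>
      (w :: (pvTakeRun (w - i) rest).1) :: pvGroups (pvTakeRun (w - i) rest).2
  termination_by ps => ps.length
  decreasing_by exact Nat.lt_succ_of_le (pvTakeRun_len _ _)

def find_consecutive_pockets_py_alt (startable_weeks : List Int) : List (List Int) :=
  (pvGroups (PySem.List.enumerate startable_weeks)).filter (fun run => decide (run.length ≥ 2))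

-- ===== PRECONDITION & SPEC =====
def Spec_find_consecutive_pockets_py (startable_weeks : List Int) (out : List (List Int)) : Prop := out = find_consecutive_pockets_py_alt startable_weeks
instance (startable_weeks : List Int) (out : List (List Int)) : Decidable (Spec_find_consecutive_pockets_py startable_weeks out) := by unfold Spec_find_consecutive_pockets_py; infer_instance

-- ===== CLAIM (what is proved, stated in full; the proofs are below) =====
def Claim_equal_find_consecutive_pockets_py : Prop := ∀ (startable_weeks : List Int), Dom_find_consecutive_pockets_py startable_weeks → Spec_find_consecutive_pockets_py startable_weeks (find_consecutive_pockets_py startable_weeks)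

-- ===== LEMMAS AND PROOFS =====

-- Common middle ground: maximal successor run, and raw run decomposition.
def pvTakeSucc (prev : Int) : List Int → List Int × List Int
  | [] => ([], [])
  | w :: rest =>
      if w = prev + 1 then
        let p := pvTakeSucc w rest
        (w :: p.1, p.2)
      else ([], w :: rest)

theorem pvTakeSucc_len (prev : Int) (ws : List Int) :
    (pvTakeSucc prev ws).2.length ≤ ws.length := by
  induction ws generalizing prev with
  | nil => simp [pvTakeSucc]
  | cons w rest ih =>
    simp only [pvTakeSucc]
    split
    · exact Nat.le_succ_of_le (ih w)
    · simp

def pvRunsC : List Int → List (List Int)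
  | [] => []
  | w :: rest => (w :: (pvTakeSucc w rest).1) :: pvRunsC (pvTakeSucc w rest).2
  termination_by ws => ws.length
  decreasing_by exact Nat.lt_succ_of_le (pvTakeSucc_len _ _)

-- B-side: pvTakeRun on an enumeration with consecutive indices is pvTakeSucc.
theorem pvTakeRun_enum (ws : List Int) (prev i : Int) :
    pvTakeRun (prev - i) (PySem.List.enumerate ws (i + 1)) =
      ((pvTakeSucc prev ws).1,
        PySem.List.enumerate (pvTakeSucc prev ws).2 (i + 1 + (pvTakeSucc prev ws).1.length)) := by
  induction ws generalizing prev i with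
  | nil => simp [pvTakeSucc, pvTakeRun, PySem.List.enumerate_nil]
  | cons w rest ih =>
    simp only [pvTakeSucc, PySem.List.enumerate_cons, pvTakeRun]
    by_cases h : w = prev + 1
    · have hk : w - (i + 1) = prev - i := by omega
      rw [if_pos hk, if_pos h]
      rw [← hk, ih w (i + 1)]
      simp only [List.length_cons, Prod.mk.injEq, true_and]
      congr 1
      push_cast
      ring
    · have hk : ¬ (w - (i + 1) = prev - i) := by omega
      rw [if_neg hk, if_neg h]
      simp [PySem.List.enumerate_cons]

theorem pvGroups_enum (ws : List Int) (i : Int) :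
    pvGroups (PySem.List.enumerate ws i) = pvRunsC ws := by
  induction hn : ws.length using Nat.strong_induction_on generalizing ws i with
  | _ n ih =>
    cases ws with
    | nil => simp [pvGroups, pvRunsC, PySem.List.enumerate_nil]
    | cons w rest =>
      rw [PySem.List.enumerate_cons, pvGroups, pvRunsC, pvTakeRun_enum rest w i]
      have hlen : (pvTakeSucc w rest).2.length < n := by
        subst hn
        simp only [List.length_cons]
        exact Nat.lt_succ_of_le (pvTakeSucc_len _ _)
      rw [ih _ hlen _ _ rfl]

-- A-side: pvGoA expressed through pvTakeSucc/pvRunsC with the length>=2 filter.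
theorem pvGoA_char (rest : List Int) (prev : Int) (current : List Int) (pockets : List (List Int)) :
    pvGoA rest pockets current prev =
      pockets ++
        (if (current ++ (pvTakeSucc prev rest).1).length ≥ 2
          then [current ++ (pvTakeSucc prev rest).1] else []) ++
        (pvRunsC (pvTakeSucc prev rest).2).filter (fun run => decide (run.length ≥ 2)) := by
  induction hn : rest.length using Nat.strong_induction_on generalizing rest prev current pockets with
  | _ n ih =>
    cases rest with
    | nil =>
      simp only [pvGoA, pvTakeSucc, pvRunsC]
      split <;> simp_all
    | cons w r =>
      simp only [pvGoA, pvTakeSucc]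
      by_cases h : w = prev + 1
      · rw [if_pos h, if_pos h]
        have hr : r.length < n := by subst hn; simp
        rw [ih _ hr r w (current ++ [w]) pockets rfl]
        simp [List.append_assoc]
      · rw [if_neg h, if_neg h]
        have hr : r.length < n := by subst hn; simp
        rw [ih _ hr r w [w] _ rfl]
        rw [pvRunsC]
        simp only [List.filter_cons]
        split <;> split <;> simp_all [List.append_assoc]

-- ===== VERDICT (by name: the statement is the Claim_ definition above) =====
theorem find_consecutive_pockets_py_spec : Claim_equal_find_consecutive_pockets_py := by
  intro ws _
  unfold Spec_find_consecutive_pockets_py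
  cases ws with
  | nil =>
    simp [find_consecutive_pockets_py, find_consecutive_pockets_py_alt,
      PySem.List.enumerate_nil, pvGroups]
  | cons w rest =>
    show pvGoA rest [] [w] w = _
    unfold find_consecutive_pockets_py_alt
    rw [pvGroups_enum, pvGoA_char, pvRunsC]
    simp only [List.filter_cons, List.nil_append, List.singleton_append]
    split <;> split <;> simp_all
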